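-- pv_equiv track=rewrite | github.com/rotem-zacaim/Zacaim-WiFi-Tool | zacaim/ui.py | _boot_feed_lines
-- ===== SOURCE A (Python) =====
-- class Colors:
--     GREEN = "\033[92m"
--     YELLOW = "\033[93m"
--     RED = "\033[91m"
--     CYAN = "\033[96m"
--     BLUE = "\033[94m"
--     MAGENTA = "\033[95m"
--     RESET = "\033[0m"
--     BOLD = "\033[1m"
--
-- LIVE_FRAMES = ["[=   ]", "[==  ]", "[=== ]", "[ ===]", "[  ==]", "[   =]"]
--
-- BOOT_FEED_STEPS = [
--     ("workspace", "mounting operator workspace"),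
--     ("registry", "loading engagement registry"),
--     ("host bus", "binding host pipeline"),
--     ("web bus", "arming web discovery engine"),
--     ("reports", "syncing report renderer"),
-- ]
--
-- def _boot_feed_lines(frame_index: int) -> list[str]:
--     lines: list[str] = []
--     active_step = min(len(BOOT_FEED_STEPS) - 1, frame_index // 5)
--     for index, (label, message) in enumerate(BOOT_FEED_STEPS):
--         if index < active_step:
--             lines.append(
--                 f"{Colors.GREEN}[ online ]{Colors.RESET} "
--                 f"{Colors.CYAN}{label:<10}{Colors.RESET} {message}"
--             )
--         elif index == active_step:
--             spinner = LIVE_FRAMES[frame_index % len(LIVE_FRAMES)]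
--             lines.append(
--                 f"{Colors.YELLOW}{spinner}{Colors.RESET} "
--                 f"{Colors.CYAN}{label:<10}{Colors.RESET} {message}"
--             )
--         else:
--             lines.append(
--                 f"{Colors.BLUE}[ queued ]{Colors.RESET} "
--                 f"{Colors.BLUE}{label:<10}{Colors.RESET} {message}"
--             )
--     return lines
-- ===== SOURCE B (Python) =====
-- class Colors:
--     GREEN = "\033[92m"
--     YELLOW = "\033[93m"
--     RED = "\033[91m"
--     CYAN = "\033[96m"
--     BLUE = "\033[94m"
--     MAGENTA = "\033[95m"
--     RESET = "\033[0m"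
--     BOLD = "\033[1m"
--
-- LIVE_FRAMES = ["[=   ]", "[==  ]", "[=== ]", "[ ===]", "[  ==]", "[   =]"]
--
-- BOOT_FEED_STEPS = [
--     ("workspace", "mounting operator workspace"),
--     ("registry", "loading engagement registry"),
--     ("host bus", "binding host pipeline"),
--     ("web bus", "arming web discovery engine"),
--     ("reports", "syncing report renderer"),
-- ]
--
--
-- def _boot_feed_lines(frame_index: int) -> list[str]:
--     countdown = min(len(BOOT_FEED_STEPS) - 1, frame_index // 5)
--
--     def render(steps, countdown):
--         if not steps:
--             return []
--         label, message = steps[0]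
--         if countdown > 0:
--             line = (
--                 f"{Colors.GREEN}[ online ]{Colors.RESET} "
--                 f"{Colors.CYAN}{label:<10}{Colors.RESET} {message}"
--             )
--         elif countdown == 0:
--             spinner = LIVE_FRAMES[frame_index % len(LIVE_FRAMES)]
--             line = (
--                 f"{Colors.YELLOW}{spinner}{Colors.RESET} "
--                 f"{Colors.CYAN}{label:<10}{Colors.RESET} {message}"
--             )
--         else:
--             line = (
--                 f"{Colors.BLUE}[ queued ]{Colors.RESET} "
--                 f"{Colors.BLUE}{label:<10}{Colors.RESET} {message}"
--             )
--         return [line] + render(steps[1:], countdown - 1)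
--
--     return render(BOOT_FEED_STEPS, countdown)
-- ===== Notes on version B (the rewrite author's own statement) =====
-- stated objective: alternative
-- what changed: Replaced A's enumerate loop with index-vs-active comparison and an append accumulator by a structural recursion over the step list that cons-builds the lines while decrementing a countdown (positive = online, zero = spinner, negative = queued).
import Mathlib
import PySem

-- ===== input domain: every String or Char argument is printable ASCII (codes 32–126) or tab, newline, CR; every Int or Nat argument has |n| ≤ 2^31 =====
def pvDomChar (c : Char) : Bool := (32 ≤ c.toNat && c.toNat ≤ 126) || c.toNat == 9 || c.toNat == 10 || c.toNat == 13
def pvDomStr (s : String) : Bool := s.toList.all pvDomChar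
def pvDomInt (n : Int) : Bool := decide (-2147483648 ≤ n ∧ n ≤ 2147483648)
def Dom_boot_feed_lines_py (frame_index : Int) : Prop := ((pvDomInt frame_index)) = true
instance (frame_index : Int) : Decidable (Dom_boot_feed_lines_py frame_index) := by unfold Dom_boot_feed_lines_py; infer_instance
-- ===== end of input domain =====

-- B replaces A's enumerate loop (index compared with active_step, append accumulator) by a
-- structural recursion over the step list that cons-builds the lines while decrementing a
-- countdown; objective: alternative decomposition, same cost.

-- shared module-level constants
def pvBootFeedSteps : List (String × String) :=
  [("workspace", "mounting operator workspace"),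
   ("registry", "loading engagement registry"),
   ("host bus", "binding host pipeline"),
   ("web bus", "arming web discovery engine"),
   ("reports", "syncing report renderer")]

def pvLiveFrames : List String :=
  ["[=   ]", "[==  ]", "[=== ]", "[ ===]", "[  ==]", "[   =]"]

-- Python f"{label:<10}" (left-justify to width 10 with spaces) — exact for any string
def pvLJust10 (s : String) : String :=
  s ++ String.ofList (List.replicate (10 - s.toList.length) ' ')

-- ===== PORT A =====
def boot_feed_lines_py (frame_index : Int) : List String :=
  let active := min ((pvBootFeedSteps.length : Int) - 1) (PySem.Int.floordiv frame_index 5)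
  (PySem.List.enumerate pvBootFeedSteps).foldl
    (fun lines p =>
      let index := p.1
      let label := p.2.1
      let message := p.2.2
      if index < active then
        lines ++ ["\x1b[92m[ online ]\x1b[0m \x1b[96m" ++ pvLJust10 label ++ "\x1b[0m " ++ message]
      else if index = active then
        let spinner := (PySem.List.pyGet? pvLiveFrames
          (PySem.Int.mod frame_index (pvLiveFrames.length : Int))).getD ""
        lines ++ ["\x1b[93m" ++ spinner ++ "\x1b[0m \x1b[96m" ++ pvLJust10 label ++ "\x1b[0m " ++ message]
      else
        lines ++ ["\x1b[94m[ queued ]\x1b[0m \x1b[94m" ++ pvLJust10 label ++ "\x1b[0m " ++ message])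
    []

-- ===== PORT B =====
-- the inner 'render' closure of Source B (frame_index is a captured variable)
def pvRender (frame_index : Int) : List (String × String) → Int → List String
  | [], _ => []
  | (label, message) :: rest, countdown =>
    (if countdown > 0 then
       "\x1b[92m[ online ]\x1b[0m \x1b[96m" ++ pvLJust10 label ++ "\x1b[0m " ++ message
     else if countdown = 0 then
       let spinner := (PySem.List.pyGet? pvLiveFrames
         (PySem.Int.mod frame_index (pvLiveFrames.length : Int))).getD ""
       "\x1b[93m" ++ spinner ++ "\x1b[0m \x1b[96m" ++ pvLJust10 label ++ "\x1b[0m " ++ message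
     else
       "\x1b[94m[ queued ]\x1b[0m \x1b[94m" ++ pvLJust10 label ++ "\x1b[0m " ++ message)
    :: pvRender frame_index rest (countdown - 1)

def boot_feed_lines_py_alt (frame_index : Int) : List String :=
  pvRender frame_index pvBootFeedSteps
    (min ((pvBootFeedSteps.length : Int) - 1) (PySem.Int.floordiv frame_index 5))

-- ===== PRECONDITION & SPEC =====
def Spec_boot_feed_lines_py (frame_index : Int) (out : List String) : Prop := out = boot_feed_lines_py_alt frame_index
instance (frame_index : Int) (out : List String) : Decidable (Spec_boot_feed_lines_py frame_index out) := by unfold Spec_boot_feed_lines_py; infer_instance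

-- ===== CLAIM (what is proved, stated in full; the proofs are below) =====
def Claim_equal_boot_feed_lines_py : Prop := ∀ (frame_index : Int), Dom_boot_feed_lines_py frame_index → Spec_boot_feed_lines_py frame_index (boot_feed_lines_py frame_index)

-- ===== LEMMAS AND PROOFS =====

-- ===== VERDICT (by name: the statement is the Claim_ definition above) =====
theorem boot_feed_lines_py_spec : Claim_equal_boot_feed_lines_py := by
  intro fi _
  unfold Spec_boot_feed_lines_py
  simp only [boot_feed_lines_py, boot_feed_lines_py_alt]
  set q := PySem.Int.floordiv fi 5 with hq
  by_cases hneg : q < 0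
  · have hm : min ((pvBootFeedSteps.length : Int) - 1) q = q := by
      simp [pvBootFeedSteps]; omega
    rw [hm]
    have h1 : ¬ ((0:Int) < q) := by omega
    have h2 : ¬ ((0:Int) = q) := by omega
    have h3 : ¬ ((1:Int) < q) := by omega
    have h4 : ¬ ((1:Int) = q) := by omega
    have h5 : ¬ ((2:Int) < q) := by omega
    have h6 : ¬ ((2:Int) = q) := by omega
    have h7 : ¬ ((3:Int) < q) := by omega
    have h8 : ¬ ((3:Int) = q) := by omega
    have h9 : ¬ ((4:Int) < q) := by omega
    have h10 : ¬ ((4:Int) = q) := by omega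
    have g1 : ¬ (q > 0) := by omega
    have g2 : ¬ (q = 0) := by omega
    have g3 : ¬ (q - 1 > 0) := by omega
    have g4 : ¬ (q - 1 = 0) := by omega
    have g6 : ¬ (q - 1 - 1 = 0) := by omega
    have g8 : ¬ (q - 1 - 1 - 1 = 0) := by omega
    have g10 : ¬ (q - 1 - 1 - 1 - 1 = 0) := by omega
    simp [pvBootFeedSteps, PySem.List.enumerate, pvRender,
      h1, h2, h3, h4, h5, h6, h7, h8, h9, h10, g1, g2, g3, g4, g6, g8, g10]
    omega
  · have hcases : q = 0 ∨ q = 1 ∨ q = 2 ∨ q = 3 ∨ q ≥ 4 := by omega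
    rcases hcases with h | h | h | h | h <;>
      [ (have hm : min ((pvBootFeedSteps.length : Int) - 1) q = 0 := by
          simp [pvBootFeedSteps]; omega);
        (have hm : min ((pvBootFeedSteps.length : Int) - 1) q = 1 := by
          simp [pvBootFeedSteps]; omega);
        (have hm : min ((pvBootFeedSteps.length : Int) - 1) q = 2 := by
          simp [pvBootFeedSteps]; omega);
        (have hm : min ((pvBootFeedSteps.length : Int) - 1) q = 3 := by
          simp [pvBootFeedSteps]; omega);
        (have hm : min ((pvBootFeedSteps.length : Int) - 1) q = 4 := by
          simp [pvBootFeedSteps]; omega)] <;>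
    · rw [hm]
      norm_num [pvBootFeedSteps, PySem.List.enumerate, pvRender]
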